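-- pv_equiv track=rewrite | github.com/jeaugohu/ARQUI | Final_20190200 (1).py | get_day_multi
-- ===== SOURCE A (Python) =====
-- def get_day_multi(day, data):
--     Finish = False
--     dia = []
--     for i in data:
--         if(i[0] == day):
--             dia.append(i)
--             Finish = True
--         else:
--             if(Finish):
--                 break
--     return dia
-- ===== SOURCE B (Python) =====
-- def get_day_multi(day, data):
--     n = len(data)
--     i = 0
--     while i < n and data[i][0] != day:
--         i += 1
--     j = i
--     while j < n and data[j][0] == day:
--         j += 1
--     return data[i:j]
-- ===== Notes on version B (the rewrite author's own statement) =====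
-- stated objective: alternative
-- what changed: B replaces A's flag-driven element loop with accumulator appends by a two-phase boundary search (advance an index past the non-matching prefix, then past the matching run) and returns one slice data[i:j].
import Mathlib
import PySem

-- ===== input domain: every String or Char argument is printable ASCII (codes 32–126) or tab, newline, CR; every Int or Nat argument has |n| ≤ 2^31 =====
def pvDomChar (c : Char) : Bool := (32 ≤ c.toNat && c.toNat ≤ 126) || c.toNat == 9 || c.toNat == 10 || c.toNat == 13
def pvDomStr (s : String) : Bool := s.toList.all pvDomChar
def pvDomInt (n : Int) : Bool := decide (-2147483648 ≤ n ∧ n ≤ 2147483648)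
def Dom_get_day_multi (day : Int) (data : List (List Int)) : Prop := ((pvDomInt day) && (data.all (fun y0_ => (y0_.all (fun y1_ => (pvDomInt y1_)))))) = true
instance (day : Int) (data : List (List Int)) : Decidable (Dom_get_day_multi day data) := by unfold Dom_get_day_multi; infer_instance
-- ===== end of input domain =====

-- B replaces A's flag-driven append loop by a two-phase boundary search returning one slice; same O(n) cost, different structure.

-- ===== PORT A =====
-- the for-loop over data with state (Finish, dia); the 'break' becomes returning dia
def pvGoA (day : Int) : List (List Int) → Bool → List (List Int) → List (List Int)
  | [], _, dia => dia
  | i :: rest, finish, dia =>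
    match PySem.List.pyGet? i 0 with
    | some h => if h == day then pvGoA day rest true (dia ++ [i])
                else if finish then dia else pvGoA day rest finish dia
    | none => dia  -- i[0] raises IndexError: outside Pre_

def get_day_multi (day : Int) (data : List (List Int)) : List (List Int) :=
  pvGoA day data false []

-- ===== PORT B =====
-- first while loop: advance i past the non-matching prefix
def pvFindStart (day : Int) (data : List (List Int)) (i : Nat) : Nat :=
  if h : i < data.length then
    match PySem.List.pyGet? data[i] 0 with
    | some hd => if hd == day then i else pvFindStart day data (i + 1)
    | none => i  -- data[i][0] raises IndexError: outside Pre_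
  else i
termination_by data.length - i

-- second while loop: advance j past the matching run
def pvFindEnd (day : Int) (data : List (List Int)) (j : Nat) : Nat :=
  if h : j < data.length then
    match PySem.List.pyGet? data[j] 0 with
    | some hd => if hd == day then pvFindEnd day data (j + 1) else j
    | none => j  -- outside Pre_
  else j
termination_by data.length - j

def get_day_multi_alt (day : Int) (data : List (List Int)) : List (List Int) :=
  PySem.List.slice data (some (pvFindStart day data 0 : Int))
    (some (pvFindEnd day data (pvFindStart day data 0) : Int))

-- ===== PRECONDITION & SPEC =====
-- Pre_ excludes exactly the inputs on which A raises IndexError: an empty row that A's scan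
-- reaches, i.e. an empty row at index i with no break pattern (a row whose head equals day
-- followed by a row whose head differs) strictly before i; B raises IndexError there too.
def Pre_get_day_multi (day : Int) (data : List (List Int)) : Prop :=
  ∀ i < data.length, data.getD i [] = [] →
    ∃ j < i, ∃ k < i, j < k ∧ (data.getD j []).head? = some day ∧ (data.getD k []).head? ≠ some day
instance (day : Int) (data : List (List Int)) : Decidable (Pre_get_day_multi day data) := by
  unfold Pre_get_day_multi; exact Nat.decidableBallLT _ _

def pvWitness_get_day_multi : Int × List (List Int) := (2, [[1], [2], [2, 3], [5]])

def Spec_get_day_multi (day : Int) (data : List (List Int)) (out : List (List Int)) : Prop := out = get_day_multi_alt day data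
instance (day : Int) (data : List (List Int)) (out : List (List Int)) : Decidable (Spec_get_day_multi day data out) := by unfold Spec_get_day_multi; infer_instance

-- ===== CLAIM (what is proved, stated in full; the proofs are below) =====
def Claim_equal_get_day_multi : Prop := ∀ (day : Int) (data : List (List Int)), Dom_get_day_multi day data → Pre_get_day_multi day data → Spec_get_day_multi day data (get_day_multi day data)

-- ===== LEMMAS AND PROOFS =====

-- length of the non-matching prefix (phase 1), mirroring the ports' none-branches
def pvNmLen (day : Int) : List (List Int) → Nat
  | [] => 0
  | r :: rest =>
    match PySem.List.pyGet? r 0 with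
    | some h => if h == day then 0 else 1 + pvNmLen day rest
    | none => 0

-- length of the matching run (phase 2)
def pvMLen (day : Int) : List (List Int) → Nat
  | [] => 0
  | r :: rest =>
    match PySem.List.pyGet? r 0 with
    | some h => if h == day then 1 + pvMLen day rest else 0
    | none => 0

theorem pvGoA_true (day : Int) (data : List (List Int)) : ∀ dia,
    pvGoA day data true dia = dia ++ data.take (pvMLen day data) := by
  induction data with
  | nil => intro dia; simp [pvGoA, pvMLen]
  | cons r rest ih =>
    intro dia
    simp only [pvGoA, pvMLen]
    cases PySem.List.pyGet? r 0 with
    | none => simp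
    | some h =>
      by_cases hd : h == day
      · simp [hd, ih, List.take_succ_cons, Nat.add_comm 1 (pvMLen day rest)]
      · simp [hd]

theorem pvGoA_eq (day : Int) (data : List (List Int)) :
    pvGoA day data false [] =
      (data.drop (pvNmLen day data)).take (pvMLen day (data.drop (pvNmLen day data))) := by
  induction data with
  | nil => simp [pvGoA]
  | cons r rest ih =>
    simp only [pvGoA, pvNmLen]
    cases heq : PySem.List.pyGet? r 0 with
    | none => simp [pvMLen, heq]
    | some h =>
      by_cases hd : h == day
      · simp only [hd, if_true, pvGoA_true, List.drop_zero, List.nil_append]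
        simp [pvMLen, heq, hd, Nat.add_comm 1 (pvMLen day rest)]
      · simpa [hd, Nat.add_comm 1 (pvNmLen day rest)] using ih

theorem pvFindStart_eq (day : Int) : ∀ (data : List (List Int)) (i : Nat),
    pvFindStart day data i = i + pvNmLen day (data.drop i) := by
  intro data i
  fun_induction pvFindStart day data i with
  | case1 i h hd heq hm =>
    rw [List.drop_eq_getElem_cons h]
    simp [pvNmLen, heq, hm]
  | case2 i h hd heq hm ih =>
    rw [List.drop_eq_getElem_cons h]
    simp [pvNmLen, heq, hm, ih]; omega
  | case3 i h heq =>
    rw [List.drop_eq_getElem_cons h]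
    simp [pvNmLen, heq]
  | case4 i h =>
    rw [List.drop_eq_nil_of_le (by omega)]
    simp [pvNmLen]

theorem pvFindEnd_eq (day : Int) : ∀ (data : List (List Int)) (j : Nat),
    pvFindEnd day data j = j + pvMLen day (data.drop j) := by
  intro data j
  fun_induction pvFindEnd day data j with
  | case1 j h hd heq hm ih =>
    rw [List.drop_eq_getElem_cons h]
    simp [pvMLen, heq, hm, ih]; omega
  | case2 j h hd heq hm =>
    rw [List.drop_eq_getElem_cons h]
    simp [pvMLen, heq, hm]
  | case3 j h heq =>
    rw [List.drop_eq_getElem_cons h]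
    simp [pvMLen, heq]
  | case4 j h =>
    rw [List.drop_eq_nil_of_le (by omega)]
    simp [pvMLen]

theorem ports_agree (day : Int) (data : List (List Int)) :
    get_day_multi day data = get_day_multi_alt day data := by
  unfold get_day_multi get_day_multi_alt
  rw [pvFindStart_eq, pvFindEnd_eq, List.drop_zero, Nat.zero_add]
  set s := pvNmLen day data with hs
  set m := pvMLen day (data.drop s) with hm
  have : ((s + m : Nat) : Int) = (s : Int) + (m : Int) := by push_cast; ring
  rw [this, PySem.List.slice_natCast_add, pvGoA_eq]

-- ===== VERDICT (by name: the statement is the Claim_ definition above) =====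
theorem get_day_multi_spec : Claim_equal_get_day_multi := by
  intro day data _ _
  unfold Spec_get_day_multi
  exact ports_agree day data
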